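-- pv_equiv track=rewrite | github.com/rakiasegev/TextID | TextID.py | makeSentenceLengths
-- ===== SOURCE A (Python) =====
-- def makeSentenceLengths(s):
--     """ use the text in the input string s to create the sentencelength dictionary."""
--
--     frequency = 0
--     length = 0
--
--     LoW = s.split() # splits the string into string of each word
--     sl = [] # list of sentence lengths
--
--     # create loop to iterate through all indices
--     # check if word has .!?, if not add oen to length
--     # if yes, check if length value is in dicitonary, if yest + 1 to frequency, if not add to dictionary, 1 frequency
--     # continue
--
--     for i in LoW:
--         length += 1
--         if i[-1] in '?!.':
--             sl += [length]
--             length = 0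
--
--     sentencelengths = {}
--
--     for l in sl: # iterate through length (l) in the list
--         if l not in sentencelengths:
--             sentencelengths[l] = 1
--         elif l in sentencelengths:
--             sentencelengths[l] += 1
--     return sentencelengths
-- ===== SOURCE B (Python) =====
-- def makeSentenceLengths(s):
--     """Positional approach: find the indices of the terminator words, take
--     consecutive differences to get sentence lengths, then build the
--     histogram per distinct length with list.count."""
--     words = s.split()
--     ends = [i for i, w in enumerate(words) if w[-1] in '?!.']
--     lengths = [e - p for p, e in zip([-1] + ends, ends)]
--     out = {}
--     for l in lengths:
--         if l not in out:
--             out[l] = lengths.count(l)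
--     return out
-- ===== Notes on version B (the rewrite author's own statement) =====
-- stated objective: alternative
-- what changed: B replaces A's running word counter and incremental dict counting with a positional algorithm: it collects the indices of terminator words via enumerate, obtains sentence lengths as consecutive differences of those indices, and builds the histogram by list.count per distinct length.
import Mathlib
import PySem

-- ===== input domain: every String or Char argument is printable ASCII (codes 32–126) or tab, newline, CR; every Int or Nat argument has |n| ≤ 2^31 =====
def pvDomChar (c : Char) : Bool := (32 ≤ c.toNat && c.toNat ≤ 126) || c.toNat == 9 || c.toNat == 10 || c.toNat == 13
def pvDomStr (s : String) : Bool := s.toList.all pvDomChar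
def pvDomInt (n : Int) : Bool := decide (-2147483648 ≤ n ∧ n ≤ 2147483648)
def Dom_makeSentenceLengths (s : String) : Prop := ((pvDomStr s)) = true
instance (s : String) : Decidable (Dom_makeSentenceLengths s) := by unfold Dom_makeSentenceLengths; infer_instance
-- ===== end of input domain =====

-- B finds terminator positions with enumerate, gets sentence lengths as index differences, and
-- builds the histogram with list.count per distinct length (objective: alternative decomposition).

-- `w[-1] in '?!.'` : last character of a word is a sentence terminator
-- (words produced by split() are nonempty, so w[-1] never raises; the none branch is unreachable).
def pvIsTerm (w : String) : Bool :=
  match PySem.Str.pyGet? w (-1) with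
  | some c => c == '?' || c == '!' || c == '.'
  | none => false

-- ===== PORT A =====
-- first loop of A: running length, collect completed sentence lengths into sl
def pvStepA (st : Int × List Int) (w : String) : Int × List Int :=
  let length := st.1 + 1
  if pvIsTerm w then (0, st.2 ++ [length]) else (length, st.2)

-- second loop of A: count frequencies incrementally
def pvCountA (d : PySem.Dict Int Int) (l : Int) : PySem.Dict Int Int :=
  if d.contains l = false then d.insert l 1
  else if d.contains l = true then d.modify l 0 (· + 1) else d

def makeSentenceLengths (s : String) : List (Int × Int) :=
  let LoW := PySem.Str.split₀ s
  let sl := (LoW.foldl pvStepA (0, [])).2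
  let sentencelengths := sl.foldl pvCountA PySem.Dict.empty
  sentencelengths.items

-- ===== PORT B =====
def makeSentenceLengths_alt (s : String) : List (Int × Int) :=
  let words := PySem.Str.split₀ s
  -- ends = [i for i, w in enumerate(words) if w[-1] in '?!.']
  let ends := (PySem.List.enumerate words 0).filterMap
    (fun p => if pvIsTerm p.2 then some p.1 else none)
  -- lengths = [e - p for p, e in zip([-1] + ends, ends)]
  let lengths := (List.zip ((-1 : Int) :: ends) ends).map (fun p => p.2 - p.1)
  -- out[l] = lengths.count(l) at the first occurrence of each l
  let out := lengths.foldl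
    (fun d l => if d.contains l then d else d.insert l (PySem.List.count lengths l : Int))
    PySem.Dict.empty
  out.items

-- ===== PRECONDITION & SPEC =====
def Spec_makeSentenceLengths (s : String) (out : List (Int × Int)) : Prop := out = makeSentenceLengths_alt s
instance (s : String) (out : List (Int × Int)) : Decidable (Spec_makeSentenceLengths s out) := by unfold Spec_makeSentenceLengths; infer_instance

-- ===== CLAIM (what is proved, stated in full; the proofs are below) =====
def Claim_equal_makeSentenceLengths : Prop := ∀ (s : String), Dom_makeSentenceLengths s → Spec_makeSentenceLengths s (makeSentenceLengths s)

-- ===== LEMMAS AND PROOFS =====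

-- recursive characterization of A's first loop (sentence lengths)
def pvSlA : List String → Int → List Int
  | [], _ => []
  | w :: ws, len => if pvIsTerm w then (len + 1) :: pvSlA ws 0 else pvSlA ws (len + 1)

-- recursive characterization of B's consecutive differences
def pvDiffs : Int → List Int → List Int
  | _, [] => []
  | prev, e :: es => (e - prev) :: pvDiffs e es

-- B's terminator-index list
def pvEnds (ws : List String) (i : Int) : List Int :=
  (PySem.List.enumerate ws i).filterMap (fun p => if pvIsTerm p.2 then some p.1 else none)

lemma pvEnds_nil (i : Int) : pvEnds [] i = [] := by
  simp [pvEnds, PySem.List.enumerate_nil]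

lemma pvEnds_cons (w : String) (ws : List String) (i : Int) :
    pvEnds (w :: ws) i = if pvIsTerm w then i :: pvEnds ws (i + 1) else pvEnds ws (i + 1) := by
  by_cases h : pvIsTerm w <;> simp [pvEnds, PySem.List.enumerate_cons, h]

lemma pvStepA_term (w : String) (len : Int) (sl : List Int) (h : pvIsTerm w = true) :
    pvStepA (len, sl) w = (0, sl ++ [len + 1]) := by simp [pvStepA, h]
lemma pvStepA_not (w : String) (len : Int) (sl : List Int) (h : pvIsTerm w = false) :
    pvStepA (len, sl) w = (len + 1, sl) := by simp [pvStepA, h]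

-- A's first loop only appends to its accumulator
lemma pvStepA_acc (ws : List String) (len : Int) (sl : List Int) :
    (ws.foldl pvStepA (len, sl)).2 = sl ++ (ws.foldl pvStepA (len, [])).2 := by
  induction ws generalizing len sl with
  | nil => simp
  | cons w ws ih =>
    simp only [List.foldl_cons]
    by_cases h : pvIsTerm w
    · rw [pvStepA_term w len sl h, pvStepA_term w len [] h,
        ih 0 (sl ++ [len + 1]), ih 0 ([] ++ [len + 1])]
      simp
    · rw [pvStepA_not w len sl (by simpa using h), pvStepA_not w len [] (by simpa using h)]
      exact ih (len + 1) sl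

-- A's first loop computes pvSlA
lemma pvFoldA_eq_slA (ws : List String) (len : Int) :
    (ws.foldl pvStepA (len, [])).2 = pvSlA ws len := by
  induction ws generalizing len with
  | nil => simp [pvSlA]
  | cons w ws ih =>
    simp only [List.foldl_cons, pvSlA]
    by_cases h : pvIsTerm w
    · rw [pvStepA_term w len [] h]
      simp only [h, if_true]
      rw [pvStepA_acc ws 0 ([] ++ [len + 1]), ih 0]
      simp
    · rw [pvStepA_not w len [] (by simpa using h)]
      simp only [h]
      exact ih (len + 1)

-- the zip-of-shifted-lists comprehension is pvDiffs
lemma pvZip_eq_diffs (ends : List Int) (prev : Int) :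
    (List.zip (prev :: ends) ends).map (fun p => p.2 - p.1) = pvDiffs prev ends := by
  induction ends generalizing prev with
  | nil => simp [pvDiffs]
  | cons e es ih => simp [pvDiffs, List.zip_cons_cons, ih]

-- consecutive differences of the terminator indices are A's sentence lengths
lemma pvDiffs_ends_eq_slA (ws : List String) (i len : Int) :
    pvDiffs (i - 1 - len) (pvEnds ws i) = pvSlA ws len := by
  induction ws generalizing i len with
  | nil => simp [pvEnds_nil, pvDiffs, pvSlA]
  | cons w ws ih =>
    rw [pvEnds_cons, pvSlA]
    by_cases h : pvIsTerm w
    · simp only [h, if_true, pvDiffs]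
      have h1 : i - (i - 1 - len) = len + 1 := by omega
      rw [h1]
      exact congrArg (List.cons (len + 1)) (by simpa using ih (i + 1) 0)
    · simp only [h]
      have : i - 1 - len = (i + 1) - 1 - (len + 1) := by omega
      rw [this]
      exact ih (i + 1) (len + 1)

-- A's counting loop is collections.Counter
lemma pvCountA_eq_counter_step :
    pvCountA = fun (d : PySem.Dict Int Int) (l : Int) => d.modify l 0 (· + 1) := by
  funext d l
  unfold pvCountA
  by_cases h : d.contains l = true
  · simp [h]
  · have h' : d.contains l = false := by simpa using h
    simp [PySem.Dict.modify, PySem.Dict.insert, PySem.Dict.getD_of_not_contains, h']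

-- B's histogram loop: items come out as first-occurrence distinct keys with full counts
lemma pvFoldB_items (v : Int → Int) (xs : List Int) (d : PySem.Dict Int Int) (S : PySem.Set Int)
    (hd : d.items = S.map (fun k => (k, v k))) :
    (xs.foldl (fun d l => if d.contains l then d else d.insert l (v l)) d).items
      = (PySem.Set.update S xs).map (fun k => (k, v k)) := by
  induction xs generalizing d S with
  | nil => simpa [PySem.Set.update] using hd
  | cons x xs ih =>
    have hkeys : d.keys = S := by
      rw [PySem.Dict.keys, hd, List.map_map]
      exact List.map_id' S
    have hupd : PySem.Set.update S (x :: xs) = PySem.Set.update (PySem.Set.add S x) xs := by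
      simp [PySem.Set.update]
    simp only [List.foldl_cons]
    by_cases hx : x ∈ S
    · have hc : d.contains x = true := by
        rw [PySem.Dict.contains_iff_mem_keys] at *
        rwa [hkeys]
      have hadd : PySem.Set.add S x = S := by simp [PySem.Set.add, PySem.Set.contains, hx]
      rw [hupd, hadd]
      simpa [hc] using ih d S hd
    · have hc : d.contains x = false := by
        rw [Bool.eq_false_iff]
        intro hcon
        rw [PySem.Dict.contains_iff_mem_keys, hkeys] at hcon
        exact hx hcon
      rw [hupd]
      simp only [hc, Bool.false_eq_true, if_false]
      apply ih
      simp [PySem.Dict.items_insert, hc, hd, PySem.Set.add, PySem.Set.contains, hx]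

-- the two histograms agree on any list of lengths
lemma pvHistogram_eq (L : List Int) :
    (L.foldl pvCountA PySem.Dict.empty).items
      = (L.foldl (fun d l => if d.contains l then d
            else d.insert l (PySem.List.count L l : Int)) PySem.Dict.empty).items := by
  rw [pvCountA_eq_counter_step]
  have hB := pvFoldB_items (fun k => (PySem.List.count L k : Int)) L PySem.Dict.empty [] (by rfl)
  rw [hB]
  have hA : L.foldl (fun (d : PySem.Dict Int Int) l => d.modify l 0 (· + 1)) PySem.Dict.empty
      = PySem.Dict.counter L := (PySem.Dict.counter_eq_foldl L).symm
  rw [hA, PySem.Dict.items_counter]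
  have : PySem.Set.update ([] : PySem.Set Int) L = PySem.Set.ofList L := by
    rw [PySem.Set.ofList_eq_foldl]; rfl
  rw [this]
  apply List.map_congr_left
  intro k _
  simp [PySem.List.count_eq]

-- ===== VERDICT (by name: the statement is the Claim_ definition above) =====
theorem makeSentenceLengths_spec : Claim_equal_makeSentenceLengths := by
  intro s _
  unfold Spec_makeSentenceLengths
  simp only [makeSentenceLengths, makeSentenceLengths_alt]
  rw [pvZip_eq_diffs]
  rw [show ((PySem.List.enumerate (PySem.Str.split₀ s) 0).filterMap
      (fun p => if pvIsTerm p.2 then some p.1 else none)) = pvEnds (PySem.Str.split₀ s) 0 from rfl]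
  rw [show (-1 : Int) = 0 - 1 - 0 by norm_num, pvDiffs_ends_eq_slA, pvFoldA_eq_slA]
  exact pvHistogram_eq _
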